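-- pv_equiv track=rewrite | github.com/HarryChen1995/data_structure_algorithm | Burst_Ballon.py | burst_ballon
-- ===== SOURCE A (Python) =====
-- def burst_ballon(arr):
--
--
--     table = [ [0 for i in arr] for j in arr ]
--     for L in reversed(range(len(arr))):
--         for R in range(L, len(arr)):
--             for i in range(L, R+1):
--                 left_L  = arr[L-1] if L else 1
--                 right_R =  1 if R == len(arr)-1 else arr[R+1]
--                 right_part = table[L][i-1] if L<= i-1 else 0
--                 left_part = table[i+1][R]  if i+1 <= R else 0
--                 s = arr[i]*left_L * right_R+right_part  +  left_part
--                 table[L][R] = max(table[L][R],s)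
--
--     return table [0][len(arr)-1]
-- ===== SOURCE B (Python) =====
-- def burst_ballon(arr):
--     n = len(arr)
--     memo = {}
--
--     def solve(L, R):
--         if L > R:
--             return 0
--         if (L, R) in memo:
--             return memo[(L, R)]
--         left = arr[L - 1] if L else 1
--         right = arr[R + 1] if R + 1 < n else 1
--         best = 0
--         for i in range(L, R + 1):
--             s = arr[i] * left * right + solve(L, i - 1) + solve(i + 1, R)
--             if s > best:
--                 best = s
--         memo[(L, R)] = best
--         return best
--
--     return solve(0, n - 1)
-- ===== Notes on version B (the rewrite author's own statement) =====
-- stated objective: alternative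
-- what changed: Replaced the bottom-up triple-loop DP table (mutated in place, rows processed in reverse) by a top-down memoized recursion solve(L,R) over intervals, maximizing over the last balloon burst; same O(n^3) work, different decomposition.
import Mathlib
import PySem

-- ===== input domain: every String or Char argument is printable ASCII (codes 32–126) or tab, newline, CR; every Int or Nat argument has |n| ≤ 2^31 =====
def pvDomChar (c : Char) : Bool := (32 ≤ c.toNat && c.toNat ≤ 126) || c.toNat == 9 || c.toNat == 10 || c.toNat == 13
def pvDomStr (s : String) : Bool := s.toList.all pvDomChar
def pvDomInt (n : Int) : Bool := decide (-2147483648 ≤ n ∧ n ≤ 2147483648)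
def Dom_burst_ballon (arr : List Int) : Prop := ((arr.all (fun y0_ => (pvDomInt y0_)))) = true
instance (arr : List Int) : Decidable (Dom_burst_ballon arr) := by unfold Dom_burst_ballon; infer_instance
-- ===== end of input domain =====

-- B replaces A's bottom-up in-place DP table by a top-down memoized interval recursion (alternative decomposition, same values).

-- ===== PORT A =====
-- table[i][j] read: every index A reaches is in range, where pyGetD is exact (IndexError impossible there)
def pvGet2 (t : List (List Int)) (i j : Int) : Int :=
  PySem.List.pyGetD (PySem.List.pyGetD t i []) j 0

-- table[i][j] = v write: indices A reaches are in range, where List.set is exact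
def pvSet2 (t : List (List Int)) (i j : Int) (v : Int) : List (List Int) :=
  t.set i.toNat ((t.getD i.toNat []).set j.toNat v)

-- body of A's innermost 'for i' loop
def pvAInner (arr : List Int) (n L R : Int) (t : List (List Int)) (i : Int) : List (List Int) :=
  let left_L : Int := if L ≠ 0 then PySem.List.pyGetD arr (L - 1) 0 else 1
  let right_R : Int := if R = n - 1 then 1 else PySem.List.pyGetD arr (R + 1) 0
  let right_part : Int := if L ≤ i - 1 then pvGet2 t L (i - 1) else 0
  let left_part : Int := if i + 1 ≤ R then pvGet2 t (i + 1) R else 0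
  let s : Int := PySem.List.pyGetD arr i 0 * left_L * right_R + right_part + left_part
  pvSet2 t L R (max (pvGet2 t L R) s)

-- body of A's 'for R' loop
def pvAMid (arr : List Int) (n L : Int) (t : List (List Int)) (R : Int) : List (List Int) :=
  (PySem.List.pyRange L (R + 1) 1).foldl (pvAInner arr n L R) t

-- body of A's 'for L in reversed(range(len(arr)))' loop
def pvAOuter (arr : List Int) (n : Int) (t : List (List Int)) (L : Int) : List (List Int) :=
  (PySem.List.pyRange L n 1).foldl (pvAMid arr n L) t

def burst_ballon (arr : List Int) : Int :=
  let n : Int := arr.length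
  let table0 : List (List Int) := arr.map (fun _ => arr.map (fun _ => (0 : Int)))
  let table := ((PySem.List.pyRange 0 n 1).reverse).foldl (pvAOuter arr n) table0
  pvGet2 table 0 (n - 1)

-- ===== PORT B =====
-- solve(L, R) with an explicit memo dict threaded through; fuel bounds the recursion depth
-- (any fuel ≥ interval length gives Python's value; burst_ballon_alt passes len(arr)+1)
def pvSolve (arr : List Int) (n : Int) :
    Nat → Int → Int → PySem.Dict (Int × Int) Int → Int × PySem.Dict (Int × Int) Int
  | 0, _, _, memo => (0, memo)
  | fuel + 1, L, R, memo =>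
    if L > R then (0, memo)
    else
      match memo.get? (L, R) with
      | some v => (v, memo)
      | none =>
        let left : Int := if L ≠ 0 then PySem.List.pyGetD arr (L - 1) 0 else 1
        let right : Int := if R + 1 < n then PySem.List.pyGetD arr (R + 1) 0 else 1
        let p := (PySem.List.pyRange L (R + 1) 1).foldl
          (fun (acc : Int × PySem.Dict (Int × Int) Int) i =>
            let r1 := pvSolve arr n fuel L (i - 1) acc.2
            let r2 := pvSolve arr n fuel (i + 1) R r1.2
            let s : Int := PySem.List.pyGetD arr i 0 * left * right + r1.1 + r2.1
            (if s > acc.1 then s else acc.1, r2.2)) (0, memo)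
        (p.1, p.2.insert (L, R) p.1)

def burst_ballon_alt (arr : List Int) : Int :=
  let n : Int := arr.length
  (pvSolve arr n (arr.length + 1) 0 (n - 1) PySem.Dict.empty).1

-- ===== PRECONDITION & SPEC =====
-- Pre_ excludes only the empty list, on which A raises IndexError (table[0][-1] on an empty table).
def Pre_burst_ballon (arr : List Int) : Prop := arr ≠ []
instance (arr : List Int) : Decidable (Pre_burst_ballon arr) := by unfold Pre_burst_ballon; infer_instance

def pvWitness_burst_ballon : List Int := [3, 1, 5, 8]

def Spec_burst_ballon (arr : List Int) (out : Int) : Prop := out = burst_ballon_alt arr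
instance (arr : List Int) (out : Int) : Decidable (Spec_burst_ballon arr out) := by unfold Spec_burst_ballon; infer_instance

-- ===== CLAIM (what is proved, stated in full; the proofs are below) =====
def Claim_equal_burst_ballon : Prop := ∀ (arr : List Int), Dom_burst_ballon arr → Pre_burst_ballon arr → Spec_burst_ballon arr (burst_ballon arr)

-- ===== LEMMAS AND PROOFS =====

-- the coin term for bursting balloon i last in interval [L, R]
def pvCoin (arr : List Int) (L R i : Int) : Int :=
  PySem.List.pyGetD arr i 0 * (if L ≠ 0 then PySem.List.pyGetD arr (L - 1) 0 else 1) *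
    (if R + 1 < (arr.length : Int) then PySem.List.pyGetD arr (R + 1) 0 else 1)

-- reference interval-DP value, fuel-indexed
def pvBest (arr : List Int) : Nat → Int → Int → Int
  | 0, _, _ => 0
  | fuel + 1, L, R =>
    if L > R then 0
    else (PySem.List.pyRange L (R + 1) 1).foldl
      (fun b i => max b (pvCoin arr L R i + pvBest arr fuel L (i - 1) + pvBest arr fuel (i + 1) R)) 0

def pvS (arr : List Int) (L R : Int) : Int := pvBest arr (R + 1 - L).toNat L R

lemma pvBest_stable (arr : List Int) :
    ∀ (f g : Nat) (L R : Int), (R + 1 - L).toNat ≤ f → (R + 1 - L).toNat ≤ g →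
      pvBest arr f L R = pvBest arr g L R := by
  intro f
  induction f with
  | zero =>
    intro g L R hf hg
    have hLR : R < L := by omega
    cases g with
    | zero => rfl
    | succ g => simp [pvBest, hLR]
  | succ f ih =>
    intro g L R hf hg
    cases g with
    | zero =>
      have hLR : R < L := by omega
      simp [pvBest, hLR]
    | succ g =>
      by_cases hLR : L > R
      · simp [pvBest, hLR]
      · simp only [pvBest, if_neg hLR]
        apply PySem.List.foldl_congr_mem
        intro b i hi
        rw [PySem.List.mem_pyRange_one] at hi
        rw [ih g L (i - 1) (by omega) (by omega), ih g (i + 1) R (by omega) (by omega)]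

lemma pvS_of_gt (arr : List Int) (L R : Int) (h : R < L) : pvS arr L R = 0 := by
  unfold pvS
  have h0 : (R + 1 - L).toNat = 0 := by omega
  rw [h0]
  rfl

lemma pvS_of_le (arr : List Int) (L R : Int) (h : L ≤ R) :
    pvS arr L R = (PySem.List.pyRange L (R + 1) 1).foldl
      (fun b i => max b (pvCoin arr L R i + pvS arr L (i - 1) + pvS arr (i + 1) R)) 0 := by
  obtain ⟨m, hm⟩ : ∃ m, (R + 1 - L).toNat = m + 1 := ⟨(R - L).toNat, by omega⟩
  unfold pvS
  rw [hm]
  simp only [pvBest, if_neg (show ¬ L > R by omega)]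
  apply PySem.List.foldl_congr_mem
  intro b i hi
  rw [PySem.List.mem_pyRange_one] at hi
  rw [pvBest_stable arr m ((i - 1) + 1 - L).toNat L (i - 1) (by omega) le_rfl,
      pvBest_stable arr m (R + 1 - (i + 1)).toNat (i + 1) R (by omega) le_rfl]

-- ---- B side ----

def pvValid (arr : List Int) (m : PySem.Dict (Int × Int) Int) : Prop :=
  ∀ (p : Int × Int) (v : Int), m.get? p = some v → v = pvS arr p.1 p.2

lemma pvValid_empty (arr : List Int) : pvValid arr PySem.Dict.empty := by
  intro p v h
  rw [PySem.Dict.get?_empty] at h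
  exact absurd h (by simp)

lemma pvValid_insert (arr : List Int) (m : PySem.Dict (Int × Int) Int) (hm : pvValid arr m)
    (L R v : Int) (hv : v = pvS arr L R) : pvValid arr (m.insert (L, R) v) := by
  intro p w h
  rw [PySem.Dict.get?_insert] at h
  by_cases hp : p = (L, R)
  · rw [if_pos hp] at h
    cases h
    subst hp
    exact hv
  · rw [if_neg hp] at h
    exact hm p w h

-- a fold over (value, memo) pairs whose step computes 'if g i > b then g i else b' and preserves P
lemma pvFoldPair {M : Type} (l : List Int) (step : (Int × M) → Int → (Int × M)) (g : Int → Int)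
    (P : M → Prop)
    (h : ∀ (acc : Int × M) (i : Int), i ∈ l → P acc.2 →
      (step acc i).1 = (if g i > acc.1 then g i else acc.1) ∧ P (step acc i).2) :
    ∀ (b : Int) (m : M), P m →
      (l.foldl step (b, m)).1 = l.foldl (fun b i => if g i > b then g i else b) b ∧
      P (l.foldl step (b, m)).2 := by
  induction l with
  | nil => exact fun b m hP => ⟨rfl, hP⟩
  | cons i l ih =>
    intro b m hP
    obtain ⟨h1, h2⟩ := h (b, m) i (List.mem_cons_self ..) hP
    have hstep : step (b, m) i = ((if g i > b then g i else b), (step (b, m) i).2) := by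
      rw [← h1]
    simp only [List.foldl_cons]
    rw [hstep]
    exact ih (fun acc j hj => h acc j (List.mem_cons_of_mem _ hj)) _ _ h2

lemma pvFoldIfMax (l : List Int) (g : Int → Int) (b : Int) :
    l.foldl (fun b i => if g i > b then g i else b) b = l.foldl (fun b i => max b (g i)) b := by
  apply PySem.List.foldl_congr_mem
  intro acc x _
  by_cases h : g x > acc
  · rw [if_pos h, max_eq_right (le_of_lt h)]
  · rw [if_neg h, max_eq_left (by omega)]

lemma pvSolve_correct (arr : List Int) :
    ∀ (fuel : Nat) (L R : Int) (m : PySem.Dict (Int × Int) Int),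
      (R + 1 - L).toNat ≤ fuel → pvValid arr m →
      (pvSolve arr (arr.length : Int) fuel L R m).1 = pvS arr L R ∧
      pvValid arr (pvSolve arr (arr.length : Int) fuel L R m).2 := by
  intro fuel
  induction fuel with
  | zero =>
    intro L R m hf hm
    exact ⟨(pvS_of_gt arr L R (by omega)).symm, hm⟩
  | succ fuel ih =>
    intro L R m hf hm
    by_cases hLR : L > R
    · simp only [pvSolve, if_pos hLR]
      exact ⟨(pvS_of_gt arr L R hLR).symm, hm⟩
    · cases hmem : m.get? (L, R) with
      | some v =>
        simp only [pvSolve, if_neg hLR, hmem]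
        exact ⟨hm (L, R) v hmem, hm⟩
      | none =>
        simp only [pvSolve, if_neg hLR, hmem]
        have hstep : ∀ (acc : Int × PySem.Dict (Int × Int) Int) (i : Int),
            i ∈ PySem.List.pyRange L (R + 1) 1 → pvValid arr acc.2 →
            (((fun (acc : Int × PySem.Dict (Int × Int) Int) i =>
            ((if PySem.List.pyGetD arr i 0 * (if L ≠ 0 then PySem.List.pyGetD arr (L - 1) 0 else 1) *
                  (if R + 1 < (arr.length : Int) then PySem.List.pyGetD arr (R + 1) 0 else 1) +
                  (pvSolve arr (arr.length : Int) fuel L (i - 1) acc.2).1 +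
                  (pvSolve arr (arr.length : Int) fuel (i + 1) R
                    (pvSolve arr (arr.length : Int) fuel L (i - 1) acc.2).2).1 > acc.1
              then PySem.List.pyGetD arr i 0 * (if L ≠ 0 then PySem.List.pyGetD arr (L - 1) 0 else 1) *
                  (if R + 1 < (arr.length : Int) then PySem.List.pyGetD arr (R + 1) 0 else 1) +
                  (pvSolve arr (arr.length : Int) fuel L (i - 1) acc.2).1 +
                  (pvSolve arr (arr.length : Int) fuel (i + 1) R
                    (pvSolve arr (arr.length : Int) fuel L (i - 1) acc.2).2).1
              else acc.1),
             (pvSolve arr (arr.length : Int) fuel (i + 1) R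
               (pvSolve arr (arr.length : Int) fuel L (i - 1) acc.2).2).2)) acc i).1 =
              (if (fun i => pvCoin arr L R i + pvS arr L (i - 1) + pvS arr (i + 1) R) i > acc.1
               then (fun i => pvCoin arr L R i + pvS arr L (i - 1) + pvS arr (i + 1) R) i
               else acc.1)) ∧
            pvValid arr ((fun (acc : Int × PySem.Dict (Int × Int) Int) i =>
            ((if PySem.List.pyGetD arr i 0 * (if L ≠ 0 then PySem.List.pyGetD arr (L - 1) 0 else 1) *
                  (if R + 1 < (arr.length : Int) then PySem.List.pyGetD arr (R + 1) 0 else 1) +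
                  (pvSolve arr (arr.length : Int) fuel L (i - 1) acc.2).1 +
                  (pvSolve arr (arr.length : Int) fuel (i + 1) R
                    (pvSolve arr (arr.length : Int) fuel L (i - 1) acc.2).2).1 > acc.1
              then PySem.List.pyGetD arr i 0 * (if L ≠ 0 then PySem.List.pyGetD arr (L - 1) 0 else 1) *
                  (if R + 1 < (arr.length : Int) then PySem.List.pyGetD arr (R + 1) 0 else 1) +
                  (pvSolve arr (arr.length : Int) fuel L (i - 1) acc.2).1 +
                  (pvSolve arr (arr.length : Int) fuel (i + 1) R
                    (pvSolve arr (arr.length : Int) fuel L (i - 1) acc.2).2).1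
              else acc.1),
             (pvSolve arr (arr.length : Int) fuel (i + 1) R
               (pvSolve arr (arr.length : Int) fuel L (i - 1) acc.2).2).2)) acc i).2 := by
          intro acc i hi hP
          rw [PySem.List.mem_pyRange_one] at hi
          obtain ⟨e1, v1⟩ := ih L (i - 1) acc.2 (by omega) hP
          obtain ⟨e2, v2⟩ := ih (i + 1) R _ (by omega) v1
          refine ⟨?_, v2⟩
          simp only [e1, e2, pvCoin]
        obtain ⟨h1, h2⟩ := pvFoldPair (PySem.List.pyRange L (R + 1) 1)
          (fun (acc : Int × PySem.Dict (Int × Int) Int) i =>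
            ((if PySem.List.pyGetD arr i 0 * (if L ≠ 0 then PySem.List.pyGetD arr (L - 1) 0 else 1) *
                  (if R + 1 < (arr.length : Int) then PySem.List.pyGetD arr (R + 1) 0 else 1) +
                  (pvSolve arr (arr.length : Int) fuel L (i - 1) acc.2).1 +
                  (pvSolve arr (arr.length : Int) fuel (i + 1) R
                    (pvSolve arr (arr.length : Int) fuel L (i - 1) acc.2).2).1 > acc.1
              then PySem.List.pyGetD arr i 0 * (if L ≠ 0 then PySem.List.pyGetD arr (L - 1) 0 else 1) *
                  (if R + 1 < (arr.length : Int) then PySem.List.pyGetD arr (R + 1) 0 else 1) +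
                  (pvSolve arr (arr.length : Int) fuel L (i - 1) acc.2).1 +
                  (pvSolve arr (arr.length : Int) fuel (i + 1) R
                    (pvSolve arr (arr.length : Int) fuel L (i - 1) acc.2).2).1
              else acc.1),
             (pvSolve arr (arr.length : Int) fuel (i + 1) R
               (pvSolve arr (arr.length : Int) fuel L (i - 1) acc.2).2).2))
          (fun i => pvCoin arr L R i + pvS arr L (i - 1) + pvS arr (i + 1) R)
          (pvValid arr) hstep 0 m hm
        refine ⟨?_, ?_⟩
        · rw [h1, pvFoldIfMax, ← pvS_of_le arr L R (by omega)]
        · apply pvValid_insert arr _ h2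
          rw [h1, pvFoldIfMax, ← pvS_of_le arr L R (by omega)]

lemma alt_eq_pvS (arr : List Int) :
    burst_ballon_alt arr = pvS arr 0 ((arr.length : Int) - 1) := by
  unfold burst_ballon_alt
  exact (pvSolve_correct arr (arr.length + 1) 0 ((arr.length : Int) - 1)
    PySem.Dict.empty (by omega) (pvValid_empty arr)).1

-- ---- A side ----

def pvMkTab (n : Nat) (f : Int → Int → Int) : List (List Int) :=
  (List.range n).map (fun (p : Nat) => (List.range n).map (fun (q : Nat) => f (↑p : Int) (↑q : Int)))

lemma pvMkTab_congr (n : Nat) (f g : Int → Int → Int)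
    (h : ∀ p q : Nat, p < n → q < n → f p q = g p q) : pvMkTab n f = pvMkTab n g := by
  unfold pvMkTab
  apply List.map_congr_left
  intro p hp
  apply List.map_congr_left
  intro q hq
  exact h p q (List.mem_range.mp hp) (List.mem_range.mp hq)

lemma pvGet2_mkTab (n : Nat) (f : Int → Int → Int) (p q : Int)
    (hp0 : 0 ≤ p) (hpn : p < (n : Int)) (hq0 : 0 ≤ q) (hqn : q < (n : Int)) :
    pvGet2 (pvMkTab n f) p q = f p q := by
  unfold pvGet2 pvMkTab
  rw [PySem.List.pyGetD_eq_getElem _ _ hp0 (by simpa using hpn)]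
  simp only [List.getElem_map, List.getElem_range]
  rw [PySem.List.pyGetD_eq_getElem _ _ hq0 (by simpa using hqn)]
  simp only [List.getElem_map, List.getElem_range]
  rw [Int.toNat_of_nonneg hp0, Int.toNat_of_nonneg hq0]

lemma pvSet2_mkTab (n : Nat) (f : Int → Int → Int) (p q : Int) (v : Int)
    (hp0 : 0 ≤ p) (hpn : p < (n : Int)) (hq0 : 0 ≤ q) (hqn : q < (n : Int)) :
    pvSet2 (pvMkTab n f) p q v = pvMkTab n (fun p' q' => if p' = p ∧ q' = q then v else f p' q') := by
  unfold pvSet2 pvMkTab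
  have hpn' : p.toNat < n := by omega
  have hqn' : q.toNat < n := by omega
  have hrow : ((List.map (fun (p : Nat) => List.map (fun (q : Nat) => f (↑p : Int) (↑q : Int)) (List.range n)) (List.range n)).getD p.toNat [])
      = List.map (fun (q : Nat) => f (↑p.toNat : Int) (↑q : Int)) (List.range n) := by
    rw [List.getD_eq_getElem _ _ (by simpa using hpn')]
    simp
  rw [hrow]
  apply List.ext_getElem
  · simp
  intro j h1 h2
  have hj1 : j < n := by simpa using h2
  simp only [List.getElem_set, List.getElem_map, List.getElem_range]
  by_cases hj : p.toNat = j
  · rw [if_pos hj]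
    subst hj
    apply List.ext_getElem
    · simp
    intro k h3 h4
    have hk1 : k < n := by simpa using h4
    simp only [List.getElem_set, List.getElem_map, List.getElem_range]
    by_cases hk : q.toNat = k
    · rw [if_pos hk, if_pos (by constructor <;> omega)]
    · rw [if_neg hk, if_neg (by rintro ⟨hh1, hh2⟩; omega)]
  · rw [if_neg hj]
    apply List.map_congr_left
    intro k hk
    rw [if_neg (by rintro ⟨hh1, hh2⟩; omega)]

-- table state: rows > k fully final; row k final strictly below column r; everything else 0
def pvTabF (arr : List Int) (k r : Int) : Int → Int → Int := fun p q =>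
  if (k < p ∧ p ≤ q) ∨ (p = k ∧ k ≤ q ∧ q < r) then pvS arr p q else 0

lemma pvA_fold (arr : List Int) (L R : Int)
    (hL : 0 ≤ L) (hLR : L ≤ R) (hR : R < (arr.length : Int)) :
    ∀ (l : List Int), (∀ i ∈ l, L ≤ i ∧ i ≤ R) → ∀ b : Int,
      l.foldl (pvAInner arr (arr.length : Int) L R)
          (pvMkTab arr.length (fun p q => if p = L ∧ q = R then b else pvTabF arr L R p q)) =
        pvMkTab arr.length (fun p q =>
          if p = L ∧ q = R then
            l.foldl (fun b i => max b (pvCoin arr L R i + pvS arr L (i - 1) + pvS arr (i + 1) R)) b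
          else pvTabF arr L R p q) := by
  intro l
  induction l with
  | nil => intro _ b; rfl
  | cons i l ih =>
    intro hmem b
    obtain ⟨hiL, hiR⟩ := hmem i (List.mem_cons_self ..)
    simp only [List.foldl_cons]
    have hstep : pvAInner arr (arr.length : Int) L R
        (pvMkTab arr.length (fun p q => if p = L ∧ q = R then b else pvTabF arr L R p q)) i =
        pvMkTab arr.length (fun p q => if p = L ∧ q = R then
          max b (pvCoin arr L R i + pvS arr L (i - 1) + pvS arr (i + 1) R)
          else pvTabF arr L R p q) := by
      simp only [pvAInner]
      have hget : pvGet2 (pvMkTab arr.length (fun p q => if p = L ∧ q = R then b else pvTabF arr L R p q)) L R = b := by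
        rw [pvGet2_mkTab _ _ L R hL (by omega) (by omega) hR]
        simp
      have hrp : (if L ≤ i - 1 then
          pvGet2 (pvMkTab arr.length (fun p q => if p = L ∧ q = R then b else pvTabF arr L R p q)) L (i - 1)
          else 0) = pvS arr L (i - 1) := by
        by_cases hc : L ≤ i - 1
        · rw [if_pos hc, pvGet2_mkTab _ _ L (i - 1) hL (by omega) (by omega) (by omega)]
          rw [if_neg (by rintro ⟨_, hh⟩; omega)]
          unfold pvTabF
          rw [if_pos (Or.inr ⟨rfl, hc, by omega⟩)]
        · rw [if_neg hc, pvS_of_gt arr L (i - 1) (by omega)]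
      have hlp : (if i + 1 ≤ R then
          pvGet2 (pvMkTab arr.length (fun p q => if p = L ∧ q = R then b else pvTabF arr L R p q)) (i + 1) R
          else 0) = pvS arr (i + 1) R := by
        by_cases hc : i + 1 ≤ R
        · rw [if_pos hc, pvGet2_mkTab _ _ (i + 1) R (by omega) (by omega) (by omega) hR]
          rw [if_neg (by rintro ⟨hh, _⟩; omega)]
          unfold pvTabF
          rw [if_pos (Or.inl ⟨by omega, hc⟩)]
        · rw [if_neg hc, pvS_of_gt arr (i + 1) R (by omega)]
      rw [hget, hrp, hlp]
      have hcoin : PySem.List.pyGetD arr i 0 * (if L ≠ 0 then PySem.List.pyGetD arr (L - 1) 0 else 1) *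
          (if R = (arr.length : Int) - 1 then 1 else PySem.List.pyGetD arr (R + 1) 0) = pvCoin arr L R i := by
        unfold pvCoin
        congr 1
        split_ifs with hh1 hh2 <;> first | rfl | omega
      rw [hcoin]
      rw [pvSet2_mkTab _ _ L R _ hL (by omega) (by omega) hR]
      apply pvMkTab_congr
      intro p' q' _ _
      by_cases hc : (p' : Int) = L ∧ (q' : Int) = R
      · rw [if_pos hc, if_pos hc]
      · rw [if_neg hc, if_neg hc, if_neg hc]
    rw [hstep, ih (fun j hj => hmem j (List.mem_cons_of_mem _ hj))]

lemma pvA_inner (arr : List Int) (L R : Int)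
    (hL : 0 ≤ L) (hLR : L ≤ R) (hR : R < (arr.length : Int)) :
    pvAMid arr (arr.length : Int) L (pvMkTab arr.length (pvTabF arr L R)) R =
      pvMkTab arr.length (pvTabF arr L (R + 1)) := by
  unfold pvAMid
  have h0 : pvMkTab arr.length (pvTabF arr L R) =
      pvMkTab arr.length (fun p q => if p = L ∧ q = R then 0 else pvTabF arr L R p q) := by
    apply pvMkTab_congr
    intro p q _ _
    by_cases hc : (p : Int) = L ∧ (q : Int) = R
    · rw [if_pos hc]
      unfold pvTabF
      rw [if_neg (by obtain ⟨h1, h2⟩ := hc; rw [h1, h2]; rintro (⟨hh, _⟩ | ⟨_, _, hh⟩) <;> omega)]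
    · rw [if_neg hc]
  rw [h0, pvA_fold arr L R hL hLR hR _
    (fun i hi => by rw [PySem.List.mem_pyRange_one] at hi; omega) 0]
  apply pvMkTab_congr
  intro p q _ hq
  by_cases hc : (p : Int) = L ∧ (q : Int) = R
  · rw [if_pos hc, ← pvS_of_le arr L R hLR]
    unfold pvTabF
    obtain ⟨h1, h2⟩ := hc
    rw [h1, h2, if_pos (Or.inr ⟨rfl, hLR, by omega⟩)]
  · rw [if_neg hc]
    unfold pvTabF
    by_cases hd : (L < (p:Int) ∧ (p:Int) ≤ q) ∨ ((p:Int) = L ∧ L ≤ (q:Int) ∧ (q:Int) < R)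
    · rw [if_pos hd, if_pos (by rcases hd with h | ⟨h1, h2, h3⟩; exact Or.inl h; exact Or.inr ⟨h1, h2, by omega⟩)]
    · rw [if_neg hd, if_neg ?_]
      rintro (h | ⟨h1, h2, h3⟩)
      · exact hd (Or.inl h)
      · by_cases hqR : (q : Int) = R
        · exact hc ⟨h1, hqR⟩
        · exact hd (Or.inr ⟨h1, h2, by omega⟩)

lemma pvA_mid (arr : List Int) (L : Int) (hL : 0 ≤ L) :
    ∀ (k : Nat) (r : Int), L ≤ r → r + k = (arr.length : Int) →
      (PySem.List.pyRange r (arr.length : Int) 1).foldl (pvAMid arr (arr.length : Int) L)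
          (pvMkTab arr.length (pvTabF arr L r)) =
        pvMkTab arr.length (pvTabF arr L (arr.length : Int)) := by
  intro k
  induction k with
  | zero =>
    intro r hLr hr
    rw [PySem.List.pyRange_one_eq_nil (by omega)]
    simp only [List.foldl_nil]
    rw [show r = ((arr.length : Int)) by omega]
  | succ k ih =>
    intro r hLr hr
    rw [PySem.List.pyRange_one_cons (by omega)]
    simp only [List.foldl_cons]
    rw [pvA_inner arr L r hL hLr (by omega)]
    exact ih (r + 1) (by omega) (by omega)

lemma pvA_outer (arr : List Int) :
    ∀ (m : Nat) (k : Int), k + 1 = (m : Int) → k < (arr.length : Int) →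
      (PySem.List.pyRange k (-1) (-1)).foldl (pvAOuter arr (arr.length : Int))
          (pvMkTab arr.length (pvTabF arr k k)) =
        pvMkTab arr.length (pvTabF arr (-1) (-1)) := by
  intro m
  induction m with
  | zero =>
    intro k hk _
    rw [show k = (-1 : Int) by omega, PySem.List.pyRange_neg_one_eq_nil (by omega)]
    rfl
  | succ m ih =>
    intro k hk hkn
    rw [PySem.List.pyRange_neg_one_cons (by omega)]
    simp only [List.foldl_cons]
    have hstep : pvAOuter arr (arr.length : Int) (pvMkTab arr.length (pvTabF arr k k)) k =
        pvMkTab arr.length (pvTabF arr (k - 1) (k - 1)) := by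
      unfold pvAOuter
      rw [pvA_mid arr k (by omega) ((arr.length : Int) - k).toNat k le_rfl (by omega)]
      apply pvMkTab_congr
      intro p q _ hq
      unfold pvTabF
      have hq' : (q : Int) < (arr.length : Int) := by omega
      by_cases hd : k ≤ (p : Int) ∧ (p : Int) ≤ q
      · rw [if_pos ?_, if_pos (Or.inl (by omega))]
        by_cases hpk : (p : Int) = k
        · exact Or.inr (by omega)
        · exact Or.inl (by omega)
      · rw [if_neg ?_, if_neg (by omega)]
        rintro (h | h) <;> omega
    rw [hstep]
    exact ih (k - 1) (by omega) (by omega)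

lemma a_eq_pvS (arr : List Int) (h : arr ≠ []) :
    burst_ballon arr = pvS arr 0 ((arr.length : Int) - 1) := by
  have hn : 1 ≤ (arr.length : Int) := by
    have := List.length_pos_iff.mpr h
    omega
  have h0 : arr.map (fun _ => arr.map (fun _ => (0 : Int))) =
      pvMkTab arr.length (pvTabF arr ((arr.length : Int) - 1) ((arr.length : Int) - 1)) := by
    rw [show arr.map (fun _ => arr.map (fun _ => (0 : Int))) =
        List.replicate arr.length (List.replicate arr.length (0 : Int)) by
      simp [List.map_const']]
    unfold pvMkTab
    apply List.ext_getElem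
    · simp
    intro j h1 h2
    have hj : j < arr.length := by simpa using h1
    simp only [List.getElem_replicate, List.getElem_map, List.getElem_range]
    apply List.ext_getElem
    · simp
    intro k h3 h4
    have hk : k < arr.length := by simpa using h3
    simp only [List.getElem_replicate, List.getElem_map, List.getElem_range]
    unfold pvTabF
    rw [if_neg (by rintro (hh | hh) <;> omega)]
  have hrev : ((PySem.List.pyRange 0 (arr.length : Int) 1).reverse) =
      PySem.List.pyRange ((arr.length : Int) - 1) (-1) (-1) := by
    rw [PySem.List.pyRange_neg_one_eq_reverse]
    norm_num
  simp only [burst_ballon]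
  rw [h0, hrev, pvA_outer arr arr.length ((arr.length : Int) - 1) (by omega) (by omega)]
  rw [pvGet2_mkTab _ _ 0 ((arr.length : Int) - 1) le_rfl (by omega) (by omega) (by omega)]
  unfold pvTabF
  rw [if_pos (by omega)]

-- ===== VERDICT (by name: the statement is the Claim_ definition above) =====
theorem burst_ballon_spec : Claim_equal_burst_ballon := by
  intro arr _ hpre
  unfold Spec_burst_ballon
  rw [a_eq_pvS arr hpre, alt_eq_pvS arr]
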